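-- pv_equiv track=rewrite | github.com/whatasame/BaekjoonHub | 프로그래머스/3/64064. 불량 사용자/불량 사용자.py | solution
-- ===== SOURCE A (Python) =====
-- from itertools import combinations, product
--
-- def solution(user_ids, banned_ids):
--     candidates = [[] for _ in range(len(banned_ids))]
--
--     for idx, banned_id in enumerate(banned_ids):
--         for user_id in user_ids:
--             if len(user_id) != len(banned_id):
--                 continue
--
--             if match(user_id, banned_id):
--                 candidates[idx].append(user_id)
--
--     answer = set()
--     for case in product(*candidates):
--         if len(set(case)) == len(banned_ids):
--             answer.add(frozenset(case))
--
--     return len(answer)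
--
-- def match(user_id, banned_id):
--     user_id = list(user_id)
--
--     for idx in find_asterisk(banned_id):
--         user_id[idx] = "*"
--
--     return "".join(user_id) == banned_id
--
-- def find_asterisk(banned_id):
--     return [idx for idx, char in enumerate(banned_id) if char == "*"]
-- ===== SOURCE B (Python) =====
-- def solution(user_ids, banned_ids):
--     candidates = [[u for u in user_ids if _match(u, b)] for b in banned_ids]
--     answer = set()
--
--     def backtrack(i, chosen):
--         if i == len(banned_ids):
--             answer.add(frozenset(chosen))
--             return
--         for u in candidates[i]:
--             if u in chosen:
--                 continue
--             chosen.append(u)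
--             backtrack(i + 1, chosen)
--             chosen.pop()
--
--     backtrack(0, [])
--     return len(answer)
--
--
-- def _match(u, b):
--     return len(u) == len(b) and all(bc == "*" or uc == bc for uc, bc in zip(u, b))
-- ===== Notes on version B (the rewrite author's own statement) =====
-- stated objective: alternative
-- what changed: Replaced itertools.product over all candidate tuples followed by a distinctness filter and frozenset dedup with a depth-first backtracking search that prunes branches reusing an already-chosen user_id, and replaced the asterisk-substitution string match by a direct per-character comparison.
import Mathlib
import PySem

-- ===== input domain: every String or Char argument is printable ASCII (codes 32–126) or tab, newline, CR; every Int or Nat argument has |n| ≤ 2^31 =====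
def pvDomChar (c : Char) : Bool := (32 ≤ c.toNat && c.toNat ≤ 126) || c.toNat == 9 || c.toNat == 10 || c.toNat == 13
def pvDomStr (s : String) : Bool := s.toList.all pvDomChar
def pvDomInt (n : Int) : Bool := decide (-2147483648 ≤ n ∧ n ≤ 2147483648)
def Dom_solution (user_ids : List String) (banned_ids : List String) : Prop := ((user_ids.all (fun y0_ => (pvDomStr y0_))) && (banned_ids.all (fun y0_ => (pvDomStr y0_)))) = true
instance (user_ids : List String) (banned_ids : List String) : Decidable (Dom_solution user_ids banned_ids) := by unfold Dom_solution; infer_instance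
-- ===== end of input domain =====

-- B replaces A's full cartesian product + late distinctness filter by depth-first backtracking
-- that prunes on already-used user_ids (objective: alternative / pruning).

-- ===== PORT A =====
-- find_asterisk(banned_id): indices of '*' (Python ints)
def findAsterisk (b : List Char) : List Int :=
  ((PySem.List.enumerate b 0).filter (fun p => p.2 == '*')).map (fun p => p.1)

-- match(user_id, banned_id): set each asterisk position of the char list to '*', compare.
-- user_id[idx] = "*" is PySem.List.pySetD (exact: solution only calls match on equal-length
-- strings, so every index is in range); "".join(chars) == banned_id is compared via char lists (exact).
def matchA (u : String) (b : String) : Bool :=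
  let cs := (findAsterisk b.toList).foldl (fun cs idx => PySem.List.pySetD cs idx '*') u.toList
  cs == b.toList

-- itertools.product(*candidates), in itertools order
def productL (cs : List (List String)) : List (List String) :=
  match cs with
  | [] => [[]]
  | c :: rest => c.flatMap (fun u => (productL rest).map (u :: ·))

-- frozenset(case) is represented canonically as the sorted list of its elements (exact here:
-- a case is only added when all its elements are distinct, and frozenset equality is
-- element-set equality, i.e. equality of the sorted duplicate-free lists).
def solution (user_ids : List String) (banned_ids : List String) : Int :=
  let candidates := banned_ids.map (fun b =>
    user_ids.foldl (fun acc u =>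
      if !(u.toList.length == b.toList.length) then acc
      else if matchA u b then acc ++ [u] else acc) [])
  let answer := (productL candidates).foldl (fun ans case =>
      if (PySem.Set.ofList case).length == banned_ids.length
      then PySem.Set.add ans (PySem.List.sorted case (fun x => x) false)
      else ans)
    ([] : PySem.Set (List String))
  (answer.length : Int)

-- ===== PORT B =====
def matchB (u : String) (b : String) : Bool :=
  u.toList.length == b.toList.length &&
    (u.toList.zip b.toList).all (fun p => p.2 == '*' || p.1 == p.2)

-- backtrack(i, chosen): chosen is passed functionally (append ↔ append+pop); frozenset(chosen)
-- is represented canonically as the sorted list of its (distinct) elements.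
def backtrack (cands : List (List String)) (chosen : List String)
    (ans : PySem.Set (List String)) : PySem.Set (List String) :=
  match cands with
  | [] => PySem.Set.add ans (PySem.List.sorted chosen (fun x => x) false)
  | c :: rest =>
    c.foldl (fun a u => if u ∈ chosen then a else backtrack rest (chosen ++ [u]) a) ans

def solution_alt (user_ids : List String) (banned_ids : List String) : Int :=
  let candidates := banned_ids.map (fun b => user_ids.filter (fun u => matchB u b))
  ((backtrack candidates [] ([] : PySem.Set (List String))).length : Int)

-- ===== PRECONDITION & SPEC =====
def Spec_solution (user_ids : List String) (banned_ids : List String) (out : Int) : Prop := out = solution_alt user_ids banned_ids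
instance (user_ids : List String) (banned_ids : List String) (out : Int) : Decidable (Spec_solution user_ids banned_ids out) := by unfold Spec_solution; infer_instance

-- ===== CLAIM (what is proved, stated in full; the proofs are below) =====
def Claim_equal_solution : Prop := ∀ (user_ids : List String) (banned_ids : List String), Dom_solution user_ids banned_ids → Spec_solution user_ids banned_ids (solution user_ids banned_ids)

-- ===== LEMMAS AND PROOFS =====

theorem setfold_length (idxs : List Int) (us : List Char) :
    (idxs.foldl (fun cs i => PySem.List.pySetD cs i '*') us).length = us.length := by
  induction idxs generalizing us with
  | nil => rfl
  | cons j idxs ih => simp [List.foldl_cons, ih, PySem.List.length_pySetD]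

theorem setfold_getElem? (idxs : List Int) (h0 : ∀ j ∈ idxs, 0 ≤ j) (us : List Char)
    (i : Nat) (hi : i < us.length) :
    (idxs.foldl (fun cs i => PySem.List.pySetD cs i '*') us)[i]? =
      some (if (i : Int) ∈ idxs then '*' else us[i]'hi) := by
  induction idxs generalizing us with
  | nil => simp [List.getElem?_eq_getElem hi]
  | cons j idxs ih =>
    have hj : (0:Int) ≤ j := h0 j (List.mem_cons_self ..)
    have h0' : ∀ j ∈ idxs, (0:Int) ≤ j := fun j hj => h0 j (List.mem_cons_of_mem _ hj)
    rw [List.foldl_cons, PySem.List.pySetD_of_nonneg us '*' hj,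
      ih h0' (us.set j.toNat '*') (by simpa using hi)]
    by_cases hmem : (i : Int) ∈ idxs
    · simp [hmem]
    · rw [if_neg hmem]
      by_cases hij : (i : Int) = j
      · have ht : j.toNat = i := by omega
        rw [if_pos (by simp [hij]), List.getElem_set, if_pos ht]
      · have hne : j.toNat ≠ i := by omega
        rw [if_neg (by simp [hij, hmem]), List.getElem_set, if_neg hne]

theorem mem_findAsterisk (bs : List Char) (i : Nat) :
    ((i : Int) ∈ findAsterisk bs) ↔ (∃ h : i < bs.length, bs[i] = '*') := by
  unfold findAsterisk
  simp only [List.mem_map, List.mem_filter, PySem.List.mem_enumerate_iff]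
  constructor
  · rintro ⟨⟨a, c⟩, ⟨⟨k, hk, hac⟩, hc⟩, h1⟩
    obtain ⟨ha, hcc⟩ := Prod.mk.injEq .. ▸ hac
    simp only at h1
    subst h1
    have hki : k = i := by omega
    subst hki
    exact ⟨hk, by
      have : c = bs[k] := by simpa using hcc
      subst this
      simpa using hc⟩
  · rintro ⟨h, hc⟩
    exact ⟨((i:Int), bs[i]), ⟨⟨i, h, by simp⟩, by simpa using hc⟩, rfl⟩

theorem findAsterisk_nonneg (bs : List Char) : ∀ j ∈ findAsterisk bs, 0 ≤ j := by
  unfold findAsterisk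
  simp only [List.mem_map, List.mem_filter, PySem.List.mem_enumerate_iff]
  rintro j ⟨⟨a, c⟩, ⟨⟨k, hk, hac⟩, hc⟩, h1⟩
  obtain ⟨ha, hcc⟩ := Prod.mk.injEq .. ▸ hac
  simp only at h1
  subst h1
  omega

theorem zip_all_aux (us bs : List Char) (hl : us.length = bs.length) :
    (List.zipWith (fun uc bc => if bc == '*' then '*' else uc) us bs == bs) =
      (us.zip bs).all (fun p => p.2 == '*' || p.1 == p.2) := by
  induction us generalizing bs with
  | nil =>
    rcases bs with _ | ⟨b, bs⟩
    · rfl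
    · simp at hl
  | cons u us ih =>
    rcases bs with _ | ⟨b, bs⟩
    · simp at hl
    · simp only [List.zipWith_cons_cons, List.zip_cons_cons, List.all_cons,
        List.cons_beq_cons]
      rw [ih bs (by simpa using hl)]
      by_cases hb : b = '*'
      · simp [hb]
      · have hb' : (b == '*') = false := by simp [hb]
        rw [if_neg (by simp [hb]), hb']
        simp

theorem matchA_char (u b : String) (hl : u.toList.length = b.toList.length) :
    matchA u b = (u.toList.zip b.toList).all (fun p => p.2 == '*' || p.1 == p.2) := by
  unfold matchA
  have hrepl : (findAsterisk b.toList).foldl (fun cs idx => PySem.List.pySetD cs idx '*') u.toList =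
      List.zipWith (fun uc bc => if bc == '*' then '*' else uc) u.toList b.toList := by
    apply List.ext_getElem?
    intro i
    by_cases hi : i < u.toList.length
    · rw [setfold_getElem? _ (findAsterisk_nonneg b.toList) _ i hi,
        List.getElem?_eq_getElem (by rw [List.length_zipWith]; omega), List.getElem_zipWith]
      congr 1
      have hib : i < b.toList.length := by omega
      by_cases hstar : b.toList[i] = '*'
      · rw [if_pos (by rw [mem_findAsterisk]; exact ⟨hib, hstar⟩), if_pos (by simp [hstar])]
      · rw [if_neg (by rw [mem_findAsterisk]; rintro ⟨hh, hc⟩; exact hstar hc),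
          if_neg (by simp [hstar])]
    · rw [List.getElem?_eq_none (by rw [setfold_length]; omega),
        List.getElem?_eq_none (by rw [List.length_zipWith]; omega)]
  rw [hrepl, zip_all_aux _ _ hl]

theorem candidates_eq (user_ids : List String) (b : String) :
    user_ids.foldl (fun acc u =>
      if !(u.toList.length == b.toList.length) then acc
      else if matchA u b then acc ++ [u] else acc) [] =
    user_ids.filter (fun u => matchB u b) := by
  rw [PySem.List.foldl_congr_mem _
    (g := fun acc u => if matchB u b then acc ++ [u] else acc) _ _ ?_]
  · exact PySem.List.foldl_append_if_eq_filter _ _ _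
  · intro acc u _
    by_cases hl : u.toList.length = b.toList.length
    · have ht : (u.toList.length == b.toList.length) = true := beq_iff_eq.mpr hl
      have hm : matchB u b = matchA u b := by
        unfold matchB
        rw [ht, Bool.true_and, ← matchA_char u b hl]
      simp only [hm, ht]
      simp
    · have hf : (u.toList.length == b.toList.length) = false := beq_eq_false_iff_ne.mpr hl
      have hm : matchB u b = false := by unfold matchB; rw [hf, Bool.false_and]
      simp only [hm, hf]
      simp

theorem foldl_flatMap {α β γ : Type} (g : α → List β) (f : γ → β → γ) (l : List α) (a : γ) :
    (l.flatMap g).foldl f a = l.foldl (fun a x => (g x).foldl f a) a := by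
  induction l generalizing a with
  | nil => rfl
  | cons x xs ih => simp [List.flatMap_cons, List.foldl_append, ih]

theorem foldl_id {α β : Type} (l : List α) (a : β) : l.foldl (fun a _ => a) a = a := by
  induction l with | nil => rfl | cons x xs ih => simp [ih]

theorem backtrack_eq (cs : List (List String)) (chosen : List String)
    (ans : PySem.Set (List String)) (h : chosen.Nodup) :
    backtrack cs chosen ans =
      (productL cs).foldl (fun a t =>
        if (chosen ++ t).Nodup
        then PySem.Set.add a (PySem.List.sorted (chosen ++ t) (fun x => x) false)
        else a) ans := by
  induction cs generalizing chosen ans with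
  | nil => simp [backtrack, productL, h]
  | cons c rest ih =>
    show c.foldl _ ans = _
    rw [show productL (c :: rest) = c.flatMap (fun u => (productL rest).map (u :: ·)) from rfl,
      foldl_flatMap]
    apply PySem.List.foldl_congr_mem
    intro a u _
    rw [List.foldl_map]
    by_cases hu : u ∈ chosen
    · rw [if_pos hu]
      have hconst : ∀ (a' : PySem.Set (List String)) (t : List String),
          (if (chosen ++ u :: t).Nodup
           then PySem.Set.add a' (PySem.List.sorted (chosen ++ u :: t) (fun x => x) false)
           else a') = a' := by
        intro a' t
        rw [if_neg]
        intro hn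
        exact (List.nodup_append.mp hn).2.2 u hu u (List.mem_cons_self ..) rfl
      refine (Eq.trans (PySem.List.foldl_congr_mem _ _ _ _ ?_) (foldl_id _ _)).symm
      intro a' t _
      exact hconst a' t
    · rw [if_neg hu]
      have hnd : (chosen ++ [u]).Nodup := by
        rw [List.nodup_append]
        refine ⟨h, List.nodup_singleton u, fun a ha b hb e => hu ?_⟩
        rw [List.mem_singleton] at hb
        subst hb; subst e; exact ha
      rw [ih (chosen ++ [u]) a hnd]
      apply PySem.List.foldl_congr_mem
      intro a' t _
      simp

theorem mem_productL_length (cs : List (List String)) (t : List String)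
    (h : t ∈ productL cs) : t.length = cs.length := by
  induction cs generalizing t with
  | nil => simp [productL] at h; simp [h]
  | cons c rest ih =>
    simp [productL] at h
    obtain ⟨u, _, t', ht', rfl⟩ := h
    simp [ih t' ht']

theorem ofList_length_eq_iff {α : Type} [BEq α] [LawfulBEq α] (t : List α) :
    ((PySem.Set.ofList t).length = t.length) ↔ t.Nodup := by
  induction t using List.reverseRecOn with
  | nil => simp
  | append_singleton t x ih =>
    rw [PySem.Set.ofList_append_singleton, PySem.Set.add_eq_ite]
    by_cases hx : x ∈ PySem.Set.ofList t
    · rw [if_pos hx]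
      have hle := PySem.Set.length_ofList_le t
      have hxm : x ∈ t := (PySem.Set.mem_ofList t x).mp hx
      simp only [List.length_append, List.length_cons, List.length_nil]
      constructor
      · intro h; omega
      · intro h
        exact absurd hxm ((List.nodup_append.mp h).2.2 x · x (List.mem_singleton.mpr rfl) rfl)
    · rw [if_neg hx]
      have hxm : x ∉ t := fun h => hx ((PySem.Set.mem_ofList t x).mpr h)
      simp only [List.length_append, List.length_cons, List.length_nil]
      constructor
      · intro h
        have h1 : (PySem.Set.ofList t).length = t.length := by omega
        rw [List.nodup_append]
        refine ⟨ih.mp h1, List.nodup_singleton x, ?_⟩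
        intro a ha bb hb e
        rw [List.mem_singleton] at hb
        subst hb; subst e
        exact hxm ha
      · intro h
        have h1 := ih.mpr (List.nodup_append.mp h).1
        omega

-- ===== VERDICT (by name: the statement is the Claim_ definition above) =====
theorem solution_spec : Claim_equal_solution := by
  intro user_ids banned_ids _
  unfold Spec_solution solution solution_alt
  simp only [candidates_eq]
  rw [backtrack_eq _ _ _ List.nodup_nil]
  congr 2
  apply PySem.List.foldl_congr_mem
  intro acc t ht
  have hlt : t.length = banned_ids.length := by
    rw [mem_productL_length _ t ht, List.length_map]
  simp only [List.nil_append]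
  by_cases hnd : t.Nodup
  · rw [if_pos hnd, if_pos (by
      rw [beq_iff_eq, (ofList_length_eq_iff t).mpr hnd]; exact hlt)]
  · rw [if_neg hnd, if_neg (by
      intro hb
      exact hnd ((ofList_length_eq_iff t).mp (by rw [beq_iff_eq] at hb; omega)))]
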